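-- pv_equiv track=rewrite | github.com/vasanthk99/ADS_assignment1-rework- | barplot.py | order_months
-- ===== SOURCE A (Python) =====
-- def order_months(months_list):
--     """Orders a list of month names in chronological order."""
--     # Define a dictionary to map month names to their corresponding numbers
--     month_to_num = {
--         'Jan': 1,
--         'Feb': 2,
--         'Mar': 3,
--         'Apr': 4,
--         'May': 5,
--         'Jun': 6,
--         'Jul': 7,
--         'Aug': 8,
--         'Sep': 9,
--         'Oct': 10,
--         'Nov': 11,
--         'Dec': 12
--     }
--     # Create a list of tuples with month names and their corresponding numbers
--     month_num_list = [(month, month_to_num[month]) for month in months_list]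
--     # Sort the list of tuples by month number
--     sorted_month_num_list = sorted(month_num_list, key=lambda x: x[1])
--     # Extract the sorted list of month names
--     sorted_months_list = [month_num[0] for month_num in sorted_month_num_list]
--     return sorted_months_list
-- ===== SOURCE B (Python) =====
-- def order_months(months_list):
--     """Orders a list of month names in chronological order (bucket sort)."""
--     month_to_num = {
--         'Jan': 1, 'Feb': 2, 'Mar': 3, 'Apr': 4, 'May': 5, 'Jun': 6,
--         'Jul': 7, 'Aug': 8, 'Sep': 9, 'Oct': 10, 'Nov': 11, 'Dec': 12
--     }
--     buckets = [[] for _ in range(12)]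
--     for month in months_list:
--         buckets[month_to_num[month] - 1].append(month)
--     result = []
--     for bucket in buckets:
--         result.extend(bucket)
--     return result
-- ===== Notes on version B (the rewrite author's own statement) =====
-- stated objective: faster
-- what changed: Replaces pair-building + comparison sort + unpairing with a single-pass bucket (counting) sort: each month is appended to the bucket for its number and the 12 buckets are concatenated in order.
import Mathlib
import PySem

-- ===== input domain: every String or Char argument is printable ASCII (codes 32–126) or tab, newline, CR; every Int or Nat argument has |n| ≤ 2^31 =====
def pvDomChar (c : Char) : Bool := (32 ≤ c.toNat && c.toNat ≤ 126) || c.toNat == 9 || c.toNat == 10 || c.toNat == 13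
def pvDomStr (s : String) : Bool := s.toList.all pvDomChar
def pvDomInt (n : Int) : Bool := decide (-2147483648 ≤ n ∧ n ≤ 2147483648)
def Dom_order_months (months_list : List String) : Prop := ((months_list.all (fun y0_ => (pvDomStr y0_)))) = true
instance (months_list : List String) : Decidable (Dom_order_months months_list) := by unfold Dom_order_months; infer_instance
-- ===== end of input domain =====

-- B replaces A's pair-build + stable comparison sort + unpair with a one-pass bucket (counting) sort over 12 buckets.


-- ===== PORT A =====
-- the month_to_num dict literal, shared verbatim by both Pythons
def monthToNum : PySem.Dict String Int :=
  PySem.Dict.ofList [("Jan", 1), ("Feb", 2), ("Mar", 3), ("Apr", 4), ("May", 5), ("Jun", 6),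
                     ("Jul", 7), ("Aug", 8), ("Sep", 9), ("Oct", 10), ("Nov", 11), ("Dec", 12)]

-- month_to_num[month]; Python raises KeyError on a missing key — those inputs are excluded by Pre_
def monthNum (m : String) : Int := PySem.Dict.getD monthToNum m 0

def order_months (months_list : List String) : List String :=
  let month_num_list := months_list.map (fun month => (month, monthNum month))
  let sorted_month_num_list := PySem.List.sorted month_num_list (fun x => x.2)
  sorted_month_num_list.map (fun month_num => month_num.1)

-- ===== PORT B =====
def order_months_alt (months_list : List String) : List String :=
  let buckets := months_list.foldl
    (fun bs month =>
      PySem.List.pySetD bs (monthNum month - 1)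
        (PySem.List.pyGetD bs (monthNum month - 1) [] ++ [month]))
    (List.replicate 12 ([] : List String))
  buckets.foldl (fun result bucket => result ++ bucket) []

-- ===== PRECONDITION & SPEC =====
def monthNames : List String :=
  ["Jan", "Feb", "Mar", "Apr", "May", "Jun", "Jul", "Aug", "Sep", "Oct", "Nov", "Dec"]

-- Pre_ excludes exactly the inputs containing a string that is not a month key, on which A raises KeyError
def Pre_order_months (months_list : List String) : Prop :=
  ∀ m ∈ months_list, m ∈ monthNames
instance (months_list : List String) : Decidable (Pre_order_months months_list) := by
  unfold Pre_order_months; infer_instance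

def pvWitness_order_months : List String := ["Mar", "Jan", "Dec", "Jan"]

def Spec_order_months (months_list : List String) (out : List String) : Prop := out = order_months_alt months_list
instance (months_list : List String) (out : List String) : Decidable (Spec_order_months months_list out) := by unfold Spec_order_months; infer_instance

-- ===== CLAIM (what is proved, stated in full; the proofs are below) =====
def Claim_equal_order_months : Prop := ∀ (months_list : List String), Dom_order_months months_list → Pre_order_months months_list → Spec_order_months months_list (order_months months_list)

-- ===== LEMMAS AND PROOFS =====

-- buckets of pairs with keys b, b+1, …, b+c-1, in stable (input) order
def bucketsP (c : Nat) (b : Int) (ys : List (String × Int)) : List (String × Int) :=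
  match c with
  | 0 => []
  | c + 1 => ys.filter (fun p => decide (p.2 = b)) ++ bucketsP c (b + 1) ys

-- B's bucket table: bucket k holds the months with number b + k, in input order
def bucketsS (c : Nat) (b : Int) (xs : List String) : List (List String) :=
  match c with
  | 0 => []
  | c + 1 => xs.filter (fun m => decide (monthNum m = b)) :: bucketsS c (b + 1) xs

lemma monthNum_bounds : ∀ m ∈ monthNames, 1 ≤ monthNum m ∧ monthNum m ≤ 12 := by decide

lemma mem_bucketsP {c : Nat} {b : Int} {ys : List (String × Int)} {p : String × Int}
    (h : p ∈ bucketsP c b ys) : b ≤ p.2 := by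
  induction c generalizing b with
  | zero => simp [bucketsP] at h
  | succ c ih =>
    simp only [bucketsP, List.mem_append] at h
    rcases h with h | h
    · have := List.of_mem_filter h; simp at this; omega
    · have := ih h; omega

lemma bucketsP_append_of_lt {c : Nat} {b : Int} {ys : List (String × Int)} {x : String × Int}
    (h : x.2 < b) : bucketsP c b (ys ++ [x]) = bucketsP c b ys := by
  induction c generalizing b with
  | zero => rfl
  | succ c ih =>
    simp only [bucketsP, List.filter_append]
    rw [ih (by omega)]
    have : ([x].filter (fun p => decide (p.2 = b))) = [] := by
      simp; omega
    simp [this]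

lemma bucketsS_append_of_lt {c : Nat} {b : Int} {xs : List String} {x : String}
    (h : monthNum x < b) : bucketsS c b (xs ++ [x]) = bucketsS c b xs := by
  induction c generalizing b with
  | zero => rfl
  | succ c ih =>
    simp only [bucketsS, List.filter_append]
    rw [ih (by omega)]
    have : ([x].filter (fun m => decide (monthNum m = b))) = [] := by
      simp; omega
    simp [this]

lemma insertBy_append_left {α : Type} (before : α → α → Bool) (x : α) (A B : List α)
    (hA : ∀ a ∈ A, before x a = false) :
    PySem.List.insertBy before x (A ++ B) = A ++ PySem.List.insertBy before x B := by
  induction A with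
  | nil => simp
  | cons a A ih =>
    have ha := hA a (by simp)
    simp [PySem.List.insertBy, ha]
    exact ih (fun a h => hA a (by simp [h]))

lemma insertBy_all_before {α : Type} (before : α → α → Bool) (x : α) (B : List α)
    (hB : ∀ b ∈ B, before x b = true) :
    PySem.List.insertBy before x B = x :: B := by
  cases B with
  | nil => simp [PySem.List.insertBy]
  | cons b B => simp [PySem.List.insertBy, hB b (by simp)]

lemma insertBy_bucketsP (c : Nat) (b : Int) (x : String × Int) (ys : List (String × Int))
    (h1 : b ≤ x.2) (h2 : x.2 < b + c) :
    PySem.List.insertBy (fun a b => decide (a.2 < b.2)) x (bucketsP c b ys)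
      = bucketsP c b (ys ++ [x]) := by
  induction c generalizing b with
  | zero => omega
  | succ c ih =>
    simp only [bucketsP, List.filter_append]
    by_cases hx : x.2 = b
    · rw [insertBy_append_left _ _ _ _ (by
        intro a ha
        have := List.of_mem_filter ha; simp at this
        simp [this, hx])]
      rw [insertBy_all_before _ _ _ (by
        intro p hp
        have := mem_bucketsP hp
        simp; omega)]
      rw [bucketsP_append_of_lt (by omega)]
      have : ([x].filter (fun p => decide (p.2 = b))) = [x] := by simp [hx]
      simp [this]
    · rw [insertBy_append_left _ _ _ _ (by
        intro a ha
        have := List.of_mem_filter ha; simp at this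
        simp; omega)]
      rw [ih (b + 1) (by omega) (by omega)]
      have : ([x].filter (fun p => decide (p.2 = b))) = [] := by
        simp; omega
      simp [this]

lemma foldl_insertBy_eq_bucketsP (ys : List (String × Int))
    (h : ∀ p ∈ ys, 1 ≤ p.2 ∧ p.2 ≤ 12) :
    ys.foldl (fun acc x => PySem.List.insertBy (fun a b => decide (a.2 < b.2)) x acc) []
      = bucketsP 12 1 ys := by
  induction ys using List.reverseRecOn with
  | nil => rfl
  | append_singleton ys x ih =>
    rw [List.foldl_append, List.foldl_cons, List.foldl_nil,
      ih (fun p hp => h p (by simp [hp]))]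
    have hx := h x (by simp)
    exact insertBy_bucketsP 12 1 x ys (by omega) (by omega)

lemma map_fst_bucketsP (c : Nat) (b : Int) (xs : List String) :
    (bucketsP c b (xs.map (fun m => (m, monthNum m)))).map (fun p => p.1)
      = (bucketsS c b xs).flatten := by
  induction c generalizing b with
  | zero => rfl
  | succ c ih =>
    simp only [bucketsP, bucketsS, List.map_append, List.flatten_cons, ih]
    congr 1
    rw [List.filter_map, List.map_map]
    simp [Function.comp_def]

lemma length_bucketsS (c : Nat) (b : Int) (xs : List String) :
    (bucketsS c b xs).length = c := by
  induction c generalizing b with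
  | zero => rfl
  | succ c ih => simp [bucketsS, ih]

lemma step_bucketsS (c : Nat) (b : Int) (m : String) (xs : List String)
    (h1 : b ≤ monthNum m) (h2 : monthNum m < b + c) :
    PySem.List.pySetD (bucketsS c b xs) (monthNum m - b)
        (PySem.List.pyGetD (bucketsS c b xs) (monthNum m - b) [] ++ [m])
      = bucketsS c b (xs ++ [m]) := by
  induction c generalizing b with
  | zero => omega
  | succ c ih =>
    by_cases hx : monthNum m = b
    · have hz : monthNum m - b = 0 := by omega
      simp only [bucketsS, hz, PySem.List.pyGetD_zero_cons]
      rw [PySem.List.pySetD_of_nonneg _ _ (by omega)]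
      simp only [Int.toNat_zero, List.set_cons_zero]
      rw [bucketsS_append_of_lt (by omega)]
      congr 1
      simp [List.filter_append, List.filter, hx]
    · have hb : b + 1 ≤ monthNum m := by omega
      have hpos : 0 < monthNum m - b := by omega
      simp only [bucketsS]
      have hget : PySem.List.pyGetD
          (xs.filter (fun m' => decide (monthNum m' = b)) :: bucketsS c (b + 1) xs)
          (monthNum m - b) []
          = PySem.List.pyGetD (bucketsS c (b + 1) xs) (monthNum m - (b + 1)) [] := by
        rw [PySem.List.pyGetD_eq_getElem _ _ (by omega)
              (by simp [length_bucketsS]; omega),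
            PySem.List.pyGetD_eq_getElem _ _ (by omega)
              (by simp [length_bucketsS]; omega)]
        have hnat : (monthNum m - b).toNat = (monthNum m - (b + 1)).toNat + 1 := by omega
        simp [hnat]
      rw [hget]
      rw [PySem.List.pySetD_of_nonneg _ _ (by omega)]
      have hnat : (monthNum m - b).toNat = (monthNum m - (b + 1)).toNat + 1 := by omega
      rw [hnat, List.set_cons_succ]
      rw [← PySem.List.pySetD_of_nonneg _ _ (by omega)]
      rw [ih (b + 1) hb (by omega)]
      congr 1
      rw [List.filter_append]
      have : ([m].filter (fun m' => decide (monthNum m' = b))) = [] := by simp; omega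
      simp [this]

lemma bucketsS_nil (c : Nat) (b : Int) : bucketsS c b [] = List.replicate c [] := by
  induction c generalizing b with
  | zero => rfl
  | succ c ih => simp [bucketsS, ih, List.replicate_succ]

lemma foldl_step_eq_bucketsS (xs : List String) (h : ∀ m ∈ xs, m ∈ monthNames) :
    xs.foldl
      (fun bs month =>
        PySem.List.pySetD bs (monthNum month - 1)
          (PySem.List.pyGetD bs (monthNum month - 1) [] ++ [month]))
      (List.replicate 12 ([] : List String))
      = bucketsS 12 1 xs := by
  induction xs using List.reverseRecOn with
  | nil => rw [List.foldl_nil, bucketsS_nil]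
  | append_singleton xs m ih =>
    rw [List.foldl_append, List.foldl_cons, List.foldl_nil,
      ih (fun p hp => h p (by simp [hp]))]
    have hm := monthNum_bounds m (h m (by simp))
    exact step_bucketsS 12 1 m xs (by omega) (by omega)

lemma foldl_append_eq_flatten (l : List (List String)) (acc : List String) :
    l.foldl (fun result bucket => result ++ bucket) acc = acc ++ l.flatten := by
  induction l generalizing acc with
  | nil => simp
  | cons x l ih => simp [ih]

-- ===== VERDICT (by name: the statement is the Claim_ definition above) =====
theorem order_months_spec : Claim_equal_order_months := by
  intro months_list _ hpre
  unfold Spec_order_months order_months order_months_alt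
  simp only
  rw [PySem.List.sorted_eq_foldl_insertBy]
  rw [foldl_insertBy_eq_bucketsP _ (by
    intro p hp
    simp only [List.mem_map] at hp
    obtain ⟨m, hm, rfl⟩ := hp
    exact monthNum_bounds m (hpre m hm))]
  rw [map_fst_bucketsP]
  rw [foldl_step_eq_bucketsS _ hpre]
  rw [foldl_append_eq_flatten]
  simp
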